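-- pv_equiv track=rewrite | github.com/MrBrantCode/unitest_baseline | mut_generate/mist_train_cf/cf_85805/solution.py | rearrange_two_operations
-- ===== SOURCE A (Python) =====
-- def rearrange_two_operations(arr, bit_shift_allowed=True):
--     """
--     Given an array 'arr' comprising N integers arr[1], arr[2], ..., arr[N]. The integers within the array
--     are randomly ordered. The goal is to determine if it's feasible to obtain a sorted, non-decreasing array by
--     following these steps:
--         1. Use a swap operation to exchange exactly a pair of elements in the array.
--         2. If permitted and needed, execute a bit-level shift operation on exactly one element.
--          - A right shift operation (x >> y) divides x by 2^y
--          - A left shift operation (x << y) multiplies x by 2^y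
--         3. The total number of performed operations(minimal swaps and maximal bit-level shifts) must not exceed two.
--
--     The function should return True if it's feasible to obtain the sorted array and False if it's not.
--     For an empty array, the function should also return True.
--
--     Note: The list can contain distinct or identical elements. The bit-level shift operation is optional
--     and can be turned off by setting the 'bit_shift_allowed' parameter to 'False'.
--
--     """
--     def is_sorted(arr):
--         return all(arr[i] <= arr[i + 1] for i in range(len(arr) - 1))
--
--     if len(arr) == 0 or is_sorted(arr):
--         return True
--
--     first_element = arr[0]
--     less_than_first = sum(1 for x in arr if x < first_element)
--
--     if less_than_first % 2 != 0:
--         return False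
--
--     for i in range(len(arr)):
--         for j in range(i + 1, len(arr)):
--             swapped_arr = arr[:i] + [arr[j]] + arr[i + 1:j] + [arr[i]] + arr[j + 1:]
--             if is_sorted(swapped_arr):
--                 return True
--
--             if bit_shift_allowed:
--                 for k in range(len(swapped_arr)):
--                     for shift in range(1, 32):
--                         shifted_arr = swapped_arr[:k] + [swapped_arr[k] >> shift] + swapped_arr[k + 1:]
--                         if is_sorted(shifted_arr):
--                             return True
--                         shifted_arr = swapped_arr[:k] + [swapped_arr[k] << shift] + swapped_arr[k + 1:]
--                         if is_sorted(shifted_arr):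
--                             return True
--
--     return False
-- ===== SOURCE B (Python) =====
-- def rearrange_two_operations(arr, bit_shift_allowed=True):
--     n = len(arr)
--     if n == 0 or arr == sorted(arr):
--         return True
--     first = arr[0]
--     if len([x for x in arr if x < first]) % 2 != 0:
--         return False
--     # One swap changes positions i, j and one shift changes position k; each can repair
--     # only adjacent violations, so more than 6 violations can never all be repaired.
--     if len([t for t in range(n - 1) if arr[t] > arr[t + 1]]) > 6:
--         return False
--     for i in range(n):
--         for j in range(i + 1, n):
--             l = arr.copy()
--             l[i], l[j] = l[j], l[i]
--             p = next((t for t in range(n - 1) if l[t] > l[t + 1]), None)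
--             if p is None:
--                 return True
--             if bit_shift_allowed and (_fix_at(l, p) or _fix_at(l, p + 1)):
--                 return True
--     return False
--
--
-- def _fix_at(l, k):
--     # Can replacing l[k] by one bit-shift of itself make l sorted?
--     # A single-element change at k can only repair violations adjacent to k,
--     # so the rest of the list must already be sorted.
--     n = len(l)
--     if not all(l[t] <= l[t + 1] for t in range(n - 1) if not (t + 1 == k or t == k)):
--         return False
--     x = l[k]
--     lo = l[k - 1] if k > 0 else None
--     hi = l[k + 1] if k < n - 1 else None
--
--     def ok(v):
--         return (lo is None or lo <= v) and (hi is None or v <= hi)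
--
--     return any(ok(x >> s) or ok(x << s) for s in range(1, 32))
-- ===== Notes on version B (the rewrite author's own statement) =====
-- stated objective: alternative
-- what changed: B replaces A's brute-force inner search (every position k and every shift amount on every swapped array, re-scanning the whole array each time) by a violation-localised check (a single-element change can only repair violations it touches, so only the two positions at one found violation are tried), adds an exact early-False exit when the array has more than 6 violations (one swap plus one shift touch at most 6 adjacent comparisons), checks sortedness against a sorted copy, and swaps by a two-index in-place copy instead of five-way slicing.
import Mathlib
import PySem

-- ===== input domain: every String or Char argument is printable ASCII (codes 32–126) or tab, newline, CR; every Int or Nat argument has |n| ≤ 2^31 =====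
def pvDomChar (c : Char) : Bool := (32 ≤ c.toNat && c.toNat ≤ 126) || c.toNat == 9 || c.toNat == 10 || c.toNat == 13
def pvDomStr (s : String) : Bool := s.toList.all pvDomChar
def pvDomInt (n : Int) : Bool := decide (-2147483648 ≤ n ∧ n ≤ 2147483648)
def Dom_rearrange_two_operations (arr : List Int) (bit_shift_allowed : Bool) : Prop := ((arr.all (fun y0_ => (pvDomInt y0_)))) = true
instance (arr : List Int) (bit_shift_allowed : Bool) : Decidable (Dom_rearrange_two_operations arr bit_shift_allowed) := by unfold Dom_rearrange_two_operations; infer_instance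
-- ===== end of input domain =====

-- B replaces A's brute-force "try every position and every shift on every swapped array"
-- inner search by a violation-localised check (a single-element change can only repair the
-- adjacent violations) plus an exact early exit when more than 6 violations exist;
-- objective: a structurally different exact re-implementation.

-- ===== PORT A =====
-- is_sorted(arr): all(arr[i] <= arr[i+1] for i in range(len(arr)-1)); indices are always in
-- range, so pyGetD with default 0 is exact here.
def pvIsSortedA (l : List Int) : Bool :=
  (PySem.List.pyRange 0 ((l.length : Int) - 1)).all (fun i =>
    decide (PySem.List.pyGetD l i 0 ≤ PySem.List.pyGetD l (i + 1) 0))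

-- arr[:i] + [arr[j]] + arr[i+1:j] + [arr[i]] + arr[j+1:]
def pvSwapA (arr : List Int) (i j : Int) : List Int :=
  PySem.List.slice arr none (some i) ++ [PySem.List.pyGetD arr j 0] ++
    PySem.List.slice arr (some (i + 1)) (some j) ++ [PySem.List.pyGetD arr i 0] ++
    PySem.List.slice arr (some (j + 1)) none

-- swapped_arr[:k] + [v] + swapped_arr[k+1:]
def pvShiftA (l : List Int) (k : Int) (v : Int) : List Int :=
  PySem.List.slice l none (some k) ++ [v] ++ PySem.List.slice l (some (k + 1)) none

def rearrange_two_operations (arr : List Int) (bit_shift_allowed : Bool) : Bool :=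
  if arr.length = 0 || pvIsSortedA arr then true
  else
    let first := PySem.List.pyGetD arr 0 0
    let less_than_first : Int := arr.foldl (fun acc x => if x < first then acc + 1 else acc) 0
    if PySem.Int.mod less_than_first 2 ≠ 0 then false
    else
      (PySem.List.pyRange 0 (arr.length : Int)).any fun i =>
        (PySem.List.pyRange (i + 1) (arr.length : Int)).any fun j =>
          let swapped := pvSwapA arr i j
          if pvIsSortedA swapped then true
          else if bit_shift_allowed then
            (PySem.List.pyRange 0 (swapped.length : Int)).any fun k =>
              (PySem.List.pyRange 1 32).any fun s =>
                pvIsSortedA (pvShiftA swapped k (PySem.List.pyGetD swapped k 0 >>> s.toNat)) ||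
                pvIsSortedA (pvShiftA swapped k (PySem.List.pyGetD swapped k 0 <<< s.toNat))
          else false

-- ===== PORT B =====
-- arr == sorted(arr)
def pvSortedEqB (l : List Int) : Bool := l == PySem.List.sorted l (fun x => x)

-- _fix_at(l, k): can one bit-shift of l[k] make l sorted?
def pvFixAtB (l : List Int) (k : Nat) : Bool :=
  let n := l.length
  if (List.range (n - 1)).all
      (fun t => if t + 1 = k ∨ t = k then true else decide (l.getD t 0 ≤ l.getD (t + 1) 0)) then
    let x := l.getD k 0
    let okv : Int → Bool := fun v =>
      (decide (k = 0) || decide (l.getD (k - 1) 0 ≤ v)) &&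
      (decide (k = n - 1) || decide (v ≤ l.getD (k + 1) 0))
    (List.range' 1 31).any fun s => okv (x >>> s) || okv (x <<< s)
  else false

def rearrange_two_operations_alt (arr : List Int) (bit_shift_allowed : Bool) : Bool :=
  let n := arr.length
  if n = 0 || pvSortedEqB arr then true
  else if (arr.filter (fun x => decide (x < arr.getD 0 0))).length % 2 ≠ 0 then false
  -- One swap changes positions i, j and one shift changes position k; each can repair only
  -- adjacent violations, so more than 6 violations can never all be repaired.
  else if 6 < ((List.range (n - 1)).filter
      (fun t => decide (arr.getD (t + 1) 0 < arr.getD t 0))).length then false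
  else
    (List.range n).any fun i =>
      (List.range' (i + 1) (n - (i + 1))).any fun j =>
        let l := (arr.set i (arr.getD j 0)).set j (arr.getD i 0)
        match (List.range (n - 1)).find? (fun t => decide (l.getD (t + 1) 0 < l.getD t 0)) with
        | none => true
        | some p => bit_shift_allowed && (pvFixAtB l p || pvFixAtB l (p + 1))

-- ===== PRECONDITION & SPEC =====
def Spec_rearrange_two_operations (arr : List Int) (bit_shift_allowed : Bool) (out : Bool) : Prop := out = rearrange_two_operations_alt arr bit_shift_allowed
instance (arr : List Int) (bit_shift_allowed : Bool) (out : Bool) : Decidable (Spec_rearrange_two_operations arr bit_shift_allowed out) := by unfold Spec_rearrange_two_operations; infer_instance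

-- ===== CLAIM (what is proved, stated in full; the proofs are below) =====
def Claim_equal_rearrange_two_operations : Prop := ∀ (arr : List Int) (bit_shift_allowed : Bool), Dom_rearrange_two_operations arr bit_shift_allowed → Spec_rearrange_two_operations arr bit_shift_allowed (rearrange_two_operations arr bit_shift_allowed)

-- ===== LEMMAS AND PROOFS =====

/-- Adjacent-sortedness, the common propositional form of both sortedness tests. -/
def SortedP (l : List Int) : Prop := ∀ t : Nat, t + 1 < l.length → l.getD t 0 ≤ l.getD (t + 1) 0

theorem sortedA_iff (l : List Int) : pvIsSortedA l = true ↔ SortedP l := by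
  unfold pvIsSortedA SortedP
  simp only [List.all_eq_true, PySem.List.mem_pyRange_one, decide_eq_true_eq]
  constructor
  · intro h t ht
    have := h (t : Int) ⟨by positivity, by omega⟩
    rwa [show ((t : Int) + 1) = ((t + 1 : Nat) : Int) by push_cast; ring,
      PySem.List.pyGetD_natCast, PySem.List.pyGetD_natCast] at this
  · intro h i ⟨h0, h1⟩
    obtain ⟨t, rfl⟩ := Int.eq_ofNat_of_zero_le h0
    rw [show ((t : Int) + 1) = ((t + 1 : Nat) : Int) by push_cast; ring,
      PySem.List.pyGetD_natCast, PySem.List.pyGetD_natCast]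
    exact h t (by omega)

theorem sortedP_iff_pairwise (l : List Int) : SortedP l ↔ List.Pairwise (· ≤ ·) l := by
  rw [← List.isChain_iff_pairwise, List.isChain_iff_getElem]
  unfold SortedP
  constructor
  · intro h i hi
    have := h i (by omega)
    rwa [List.getD_eq_getElem l 0 (by omega), List.getD_eq_getElem l 0 (by omega)] at this
  · intro h t ht
    have := h t (by omega)
    rwa [← List.getD_eq_getElem l 0 (by omega), ← List.getD_eq_getElem l 0 (by omega)] at this

theorem insertBy_of_all_le (x : Int) (acc : List Int)
    (h : ∀ a ∈ acc, ¬(x < a)) :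
    PySem.List.insertBy (fun a b => decide (a < b)) x acc = acc ++ [x] := by
  induction acc with
  | nil => rfl
  | cons y ys ih =>
    rw [show PySem.List.insertBy (fun a b => decide (a < b)) x (y :: ys)
        = if decide (x < y) = true then x :: y :: ys
          else y :: PySem.List.insertBy (fun a b => decide (a < b)) x ys from rfl]
    rw [if_neg (by simpa using h y (by simp)), ih (fun a ha => h a (by simp [ha]))]
    simp

/-- Python's (stable) sort leaves an already ≤-sorted list unchanged. -/
theorem foldl_insert_sorted (l acc : List Int) (h : List.Pairwise (· ≤ ·) (acc ++ l)) :
    List.foldl (fun acc x => PySem.List.insertBy (fun a b => decide (a < b)) x acc) acc l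
      = acc ++ l := by
  induction l generalizing acc with
  | nil => simp
  | cons x xs ih =>
    rw [List.foldl_cons, insertBy_of_all_le x acc (fun a ha => by
      have := (List.pairwise_append.1 h).2.2 a ha x (by simp)
      omega)]
    rw [ih (acc ++ [x]) (by simpa using h)]
    simp

theorem sortedEqB_iff (l : List Int) : pvSortedEqB l = true ↔ SortedP l := by
  unfold pvSortedEqB
  rw [beq_iff_eq, sortedP_iff_pairwise]
  constructor
  · intro h
    have hp := PySem.List.sorted_pairwise l (fun x => x)
    rw [← h] at hp
    simpa using hp
  · intro h
    have : PySem.List.sorted l (fun x => x) = l := by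
      unfold PySem.List.sorted
      simp only [if_neg (by simp : ¬(false = true))]
      exact foldl_insert_sorted l [] (by simpa using h)
    exact this.symm

theorem getD_set_ite (l : List Int) (k t : Nat) (v : Int) :
    (l.set k v).getD t 0 = if t = k ∧ k < l.length then v else l.getD t 0 := by
  simp only [List.getD_eq_getElem?_getD, List.getElem?_set]
  by_cases h : k = t
  · subst h
    by_cases h2 : k < l.length <;> simp [h2]
  · have hne : ¬(t = k ∧ k < l.length) := fun hc => h hc.1.symm
    simp [h, hne]

/-- Characterisation: setting position k (k < length) yields a sorted list iff the rest is
sorted ignoring comparisons that touch k and the new value fits between its neighbours. -/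
theorem sortedP_set_iff (l : List Int) (k : Nat) (v : Int) (hk : k < l.length) :
    SortedP (l.set k v) ↔
      (∀ t : Nat, t + 1 < l.length → ¬(t + 1 = k ∨ t = k) → l.getD t 0 ≤ l.getD (t + 1) 0) ∧
      (k = 0 ∨ l.getD (k - 1) 0 ≤ v) ∧ (k = l.length - 1 ∨ v ≤ l.getD (k + 1) 0) := by
  unfold SortedP
  simp only [List.length_set, getD_set_ite]
  constructor
  · intro h
    refine ⟨fun t ht hn => ?_, ?_, ?_⟩
    · have := h t ht
      rw [if_neg (by omega), if_neg (by omega)] at this; exact this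
    · by_cases h0 : k = 0
      · exact Or.inl h0
      · refine Or.inr ?_
        have := h (k - 1) (by omega)
        rw [if_neg (by omega), if_pos (by omega)] at this
        exact this
    · by_cases hl : k = l.length - 1
      · exact Or.inl hl
      · refine Or.inr ?_
        have := h k (by omega)
        rw [if_pos (by omega), if_neg (by omega)] at this; exact this
  · rintro ⟨hex, hlo, hhi⟩ t ht
    by_cases htk : t = k
    · subst htk
      rw [if_pos (by omega), if_neg (by omega)]
      rcases hhi with h | h
      · omega
      · exact h
    · by_cases htk1 : t + 1 = k
      · rw [if_neg (by omega), if_pos (by omega)]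
        rcases hlo with h | h
        · omega
        · rwa [show t = k - 1 by omega]
      · rw [if_neg (by omega), if_neg (by omega)]
        exact hex t ht (by omega)

/-- A single-position change can only sort the list if it touches an existing violation. -/
theorem set_sorted_loc (l : List Int) (k p : Nat) (v : Int)
    (hp : p + 1 < l.length) (hv : l.getD (p + 1) 0 < l.getD p 0)
    (hs : SortedP (l.set k v)) : k = p ∨ k = p + 1 := by
  by_contra hc
  push Not at hc
  have := hs p (by simpa using hp)
  rw [getD_set_ite, getD_set_ite, if_neg (by omega), if_neg (by omega)] at this
  omega

theorem fixAtB_iff (l : List Int) (k : Nat) (hk : k < l.length) :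
    pvFixAtB l k = true ↔
      ∃ s : Nat, 1 ≤ s ∧ s < 32 ∧
        (SortedP (l.set k (l.getD k 0 >>> s)) ∨ SortedP (l.set k (l.getD k 0 <<< s))) := by
  unfold pvFixAtB
  dsimp only
  have hex : ((List.range (l.length - 1)).all
      (fun t => if t + 1 = k ∨ t = k then true else decide (l.getD t 0 ≤ l.getD (t + 1) 0)) = true)
      ↔ (∀ t : Nat, t + 1 < l.length → ¬(t + 1 = k ∨ t = k) → l.getD t 0 ≤ l.getD (t + 1) 0) := by
    simp only [List.all_eq_true, List.mem_range]
    constructor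
    · intro h t ht hn
      have := h t (by omega)
      rwa [if_neg hn, decide_eq_true_eq] at this
    · intro h t ht
      by_cases hn : t + 1 = k ∨ t = k
      · simp [hn]
      · rw [if_neg hn, decide_eq_true_eq]; exact h t (by omega) hn
  split
  case isTrue hall =>
    rw [hex] at hall
    simp only [List.any_eq_true, List.mem_range'_1, Bool.or_eq_true, Bool.and_eq_true,
      decide_eq_true_eq]
    constructor
    · rintro ⟨s, ⟨hs1, hs2⟩, hok⟩
      refine ⟨s, hs1, by omega, ?_⟩
      rcases hok with ⟨h1, h2⟩ | ⟨h1, h2⟩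
      · exact Or.inl ((sortedP_set_iff l k _ hk).2 ⟨hall, h1, h2⟩)
      · exact Or.inr ((sortedP_set_iff l k _ hk).2 ⟨hall, h1, h2⟩)
    · rintro ⟨s, hs1, hs2, hok⟩
      refine ⟨s, ⟨hs1, by omega⟩, ?_⟩
      rcases hok with h | h
      · exact Or.inl ⟨((sortedP_set_iff l k _ hk).1 h).2.1, ((sortedP_set_iff l k _ hk).1 h).2.2⟩
      · exact Or.inr ⟨((sortedP_set_iff l k _ hk).1 h).2.1, ((sortedP_set_iff l k _ hk).1 h).2.2⟩
  case isFalse hall =>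
    rw [hex] at hall
    constructor
    · intro h; cases h
    · rintro ⟨s, hs1, hs2, hok⟩
      rcases hok with h | h <;> exact absurd ((sortedP_set_iff l k _ hk).1 h).1 hall

theorem shiftA_set (l : List Int) (k : Nat) (v : Int) (hk : k < l.length) :
    pvShiftA l (k : Int) v = l.set k v := by
  unfold pvShiftA
  rw [PySem.List.slice_to_natCast,
    show ((k : Int) + 1) = ((k + 1 : Nat) : Int) by push_cast; ring,
    PySem.List.slice_from_natCast, List.set_eq_take_cons_drop v hk]
  simp

theorem swapA_set (arr : List Int) (i j : Nat) (hij : i < j) (hj : j < arr.length) :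
    pvSwapA arr (i : Int) (j : Int) =
      (arr.set i (arr.getD j 0)).set j (arr.getD i 0) := by
  unfold pvSwapA
  rw [PySem.List.slice_to_natCast,
    show ((i : Int) + 1) = ((i + 1 : Nat) : Int) by push_cast; ring,
    show ((j : Int) + 1) = ((j + 1 : Nat) : Int) by push_cast; ring,
    PySem.List.slice_natCast, PySem.List.slice_from_natCast,
    PySem.List.pyGetD_natCast, PySem.List.pyGetD_natCast]
  rw [List.set_eq_take_cons_drop (arr.getD i 0)
    (by simp; omega : j < (arr.set i (arr.getD j 0)).length)]
  rw [List.set_eq_take_cons_drop (arr.getD j 0) (by omega : i < arr.length)]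
  rw [List.take_append, List.drop_append]
  have hti : (arr.take i).length = i := by simp; omega
  rw [hti, List.take_take, show min j i = i by omega,
    show j - i = (j - i - 1) + 1 by omega, List.take_succ_cons,
    show j + 1 - i = (j - i) + 1 by omega, List.drop_succ_cons,
    List.drop_drop, List.drop_eq_nil_of_le (by omega : (arr.take i).length ≤ j + 1)]
  simp
  rw [show j - (i + 1) = j - i - 1 by omega, show i + 1 + (j - i) = j + 1 by omega]

/-- Per swapped list with a known violation, A's brute-force shift search equals B's
violation-localised check. -/
theorem shift_phase_eq (l : List Int) (p : Nat) (hp : p + 1 < l.length)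
    (hv : l.getD (p + 1) 0 < l.getD p 0) :
    ((PySem.List.pyRange 0 (l.length : Int)).any fun k =>
      (PySem.List.pyRange 1 32).any fun s =>
        pvIsSortedA (pvShiftA l k (PySem.List.pyGetD l k 0 >>> s.toNat)) ||
        pvIsSortedA (pvShiftA l k (PySem.List.pyGetD l k 0 <<< s.toNat)))
    = (pvFixAtB l p || pvFixAtB l (p + 1)) := by
  rw [Bool.eq_iff_iff]
  simp only [List.any_eq_true, PySem.List.mem_pyRange_one, Bool.or_eq_true]
  constructor
  · rintro ⟨k, ⟨hk0, hkn⟩, s, ⟨hs1, hs32⟩, hsort⟩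
    obtain ⟨kn, rfl⟩ := Int.eq_ofNat_of_zero_le hk0
    have hkn' : kn < l.length := by omega
    rw [PySem.List.pyGetD_natCast, shiftA_set l kn _ hkn', shiftA_set l kn _ hkn',
      sortedA_iff, sortedA_iff] at hsort
    have hloc : kn = p ∨ kn = p + 1 := by
      rcases hsort with h | h
      · exact set_sorted_loc l kn p _ hp hv h
      · exact set_sorted_loc l kn p _ hp hv h
    have hfix : pvFixAtB l kn = true := by
      rw [fixAtB_iff l kn hkn']
      exact ⟨s.toNat, by omega, by omega, hsort⟩
    rcases hloc with rfl | rfl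
    · exact Or.inl hfix
    · exact Or.inr hfix
  · rintro (hf | hf)
    · obtain ⟨s, hs1, hs32, hsort⟩ := (fixAtB_iff l p (by omega)).1 hf
      refine ⟨(p : Int), ⟨by positivity, by exact_mod_cast Nat.cast_lt.2 (by omega)⟩,
        (s : Int), ⟨by exact_mod_cast Nat.one_le_cast.2 hs1, by exact_mod_cast Nat.cast_lt.2 hs32⟩, ?_⟩
      rw [PySem.List.pyGetD_natCast, Int.toNat_natCast,
        shiftA_set l p _ (by omega), shiftA_set l p _ (by omega), sortedA_iff, sortedA_iff]
      exact hsort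
    · obtain ⟨s, hs1, hs32, hsort⟩ := (fixAtB_iff l (p + 1) (by omega)).1 hf
      refine ⟨((p + 1 : Nat) : Int), ⟨by positivity, by exact_mod_cast Nat.cast_lt.2 (by omega)⟩,
        (s : Int), ⟨by exact_mod_cast Nat.one_le_cast.2 hs1, by exact_mod_cast Nat.cast_lt.2 hs32⟩, ?_⟩
      rw [PySem.List.pyGetD_natCast, Int.toNat_natCast,
        shiftA_set l (p + 1) _ (by omega), shiftA_set l (p + 1) _ (by omega), sortedA_iff, sortedA_iff]
      exact hsort

theorem getD_set_ne (l : List Int) (k t : Nat) (v : Int) (h : t ≠ k) :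
    (l.set k v).getD t 0 = l.getD t 0 := by
  rw [getD_set_ite, if_neg (fun hc => h hc.1)]

/-- A sorted list obtained from `arr` by overwriting the positions in scope can only have had
violations adjacent to an overwritten position. -/
theorem sorted_set3_viol (arr : List Int) (i j k : Nat) (x y v : Int)
    (hs : SortedP (((arr.set i x).set j y).set k v)) (p : Nat) (hp : p + 1 < arr.length)
    (hv : arr.getD (p + 1) 0 < arr.getD p 0) :
    p = i ∨ p + 1 = i ∨ p = j ∨ p + 1 = j ∨ p = k ∨ p + 1 = k := by
  by_contra hc
  push Not at hc
  have h1 := hs p (by simpa using hp)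
  rw [getD_set_ne _ _ _ _ (by omega), getD_set_ne _ _ _ _ (by omega),
    getD_set_ne _ _ _ _ (by omega), getD_set_ne _ _ _ _ (by omega),
    getD_set_ne _ _ _ _ (by omega), getD_set_ne _ _ _ _ (by omega)] at h1
  omega

theorem sorted_set2_viol (arr : List Int) (i j : Nat) (x y : Int)
    (hs : SortedP ((arr.set i x).set j y)) (p : Nat) (hp : p + 1 < arr.length)
    (hv : arr.getD (p + 1) 0 < arr.getD p 0) :
    p = i ∨ p + 1 = i ∨ p = j ∨ p + 1 = j := by
  by_contra hc
  push Not at hc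
  have h1 := hs p (by simpa using hp)
  rw [getD_set_ne _ _ _ _ (by omega), getD_set_ne _ _ _ _ (by omega),
    getD_set_ne _ _ _ _ (by omega), getD_set_ne _ _ _ _ (by omega)] at h1
  omega

/-- If every violation position lies in `S`, there are at most `S.length` violations. -/
theorem viol_count_le (arr : List Int) (S : List Nat)
    (h : ∀ p : Nat, p + 1 < arr.length → arr.getD (p + 1) 0 < arr.getD p 0 → p ∈ S) :
    ((List.range (arr.length - 1)).filter
      (fun t => decide (arr.getD (t + 1) 0 < arr.getD t 0))).length ≤ S.length := by
  set l := (List.range (arr.length - 1)).filter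
      (fun t => decide (arr.getD (t + 1) 0 < arr.getD t 0)) with hl
  have hnd : l.Nodup := List.Nodup.filter _ (List.nodup_range)
  have hsub : l ⊆ S := by
    intro p hpmem
    rw [hl, List.mem_filter, List.mem_range, decide_eq_true_eq] at hpmem
    exact h p (by omega) hpmem.2
  calc l.length = l.toFinset.card := (List.toFinset_card_of_nodup hnd).symm
    _ ≤ S.toFinset.card :=
        Finset.card_le_card (fun x hx => List.mem_toFinset.2 (hsub (List.mem_toFinset.1 hx)))
    _ ≤ S.length := S.toFinset_card_le

/-- With more than 6 violations, no swap (plus optional shift) can help: A's search is empty. -/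
theorem bodyA_false_of_many_viols (arr : List Int) (bsa : Bool) (i j : Nat)
    (hij : i < j) (hj : j < arr.length)
    (hV : 6 < ((List.range (arr.length - 1)).filter
      (fun t => decide (arr.getD (t + 1) 0 < arr.getD t 0))).length) :
    (let sw := pvSwapA arr (i : Int) (j : Int)
     if pvIsSortedA sw then true
     else if bsa then
       (PySem.List.pyRange 0 (sw.length : Int)).any fun k =>
         (PySem.List.pyRange 1 32).any fun s =>
           pvIsSortedA (pvShiftA sw k (PySem.List.pyGetD sw k 0 >>> s.toNat)) ||
           pvIsSortedA (pvShiftA sw k (PySem.List.pyGetD sw k 0 <<< s.toNat))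
     else false) = false := by
  dsimp only
  rw [swapA_set arr i j hij hj]
  have hswlen : ((arr.set i (arr.getD j 0)).set j (arr.getD i 0)).length = arr.length := by simp
  have hnots : ¬(pvIsSortedA ((arr.set i (arr.getD j 0)).set j (arr.getD i 0)) = true) := by
    rw [sortedA_iff]
    intro hs
    have := viol_count_le arr [i, i - 1, j, j - 1]
      (fun p hp hv => by
        rcases sorted_set2_viol arr i j _ _ hs p hp hv with h | h | h | h <;> simp <;> omega)
    simp only [List.length_cons, List.length_nil] at this
    omega
  rw [if_neg hnots]
  cases bsa with
  | false => simp
  | true =>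
    rw [if_pos rfl]
    rw [List.any_eq_false]
    intro k hk
    simp only [Bool.not_eq_true]
    rw [List.any_eq_false]
    intro s hs
    simp only [Bool.not_eq_true]
    rw [PySem.List.mem_pyRange_one] at hk
    obtain ⟨kn, rfl⟩ := Int.eq_ofNat_of_zero_le hk.1
    have hkn : kn < arr.length := by
      rw [hswlen] at hk; omega
    rw [Bool.or_eq_false_iff]
    constructor <;>
    · rw [shiftA_set _ kn _ (by omega), Bool.eq_false_iff, Ne, sortedA_iff]
      intro hsort
      have := viol_count_le arr [i, i - 1, j, j - 1, kn, kn - 1]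
        (fun p hp hv => by
          rcases sorted_set3_viol arr i j kn _ _ _ hsort p hp hv with
            h | h | h | h | h | h <;> simp <;> omega)
      simp only [List.length_cons, List.length_nil] at this
      omega

/-- Per pair (i, j), A's inner body equals B's inner body. -/
theorem body_eq (arr : List Int) (bsa : Bool) (i j : Nat) (hij : i < j) (hj : j < arr.length) :
    (let sw := pvSwapA arr (i : Int) (j : Int)
     if pvIsSortedA sw then true
     else if bsa then
       (PySem.List.pyRange 0 (sw.length : Int)).any fun k =>
         (PySem.List.pyRange 1 32).any fun s =>
           pvIsSortedA (pvShiftA sw k (PySem.List.pyGetD sw k 0 >>> s.toNat)) ||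
           pvIsSortedA (pvShiftA sw k (PySem.List.pyGetD sw k 0 <<< s.toNat))
     else false)
    = (let L := (arr.set i (arr.getD j 0)).set j (arr.getD i 0)
       match (List.range (arr.length - 1)).find?
           (fun t => decide (L.getD (t + 1) 0 < L.getD t 0)) with
       | none => true
       | some p => bsa && (pvFixAtB L p || pvFixAtB L (p + 1))) := by
  dsimp only
  rw [swapA_set arr i j hij hj]
  have hLlen : ((arr.set i (arr.getD j 0)).set j (arr.getD i 0)).length = arr.length := by simp
  cases hfind : (List.range (arr.length - 1)).find?
      (fun t => decide (((arr.set i (arr.getD j 0)).set j (arr.getD i 0)).getD (t + 1) 0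
        < ((arr.set i (arr.getD j 0)).set j (arr.getD i 0)).getD t 0)) with
  | none =>
    have hsL : SortedP ((arr.set i (arr.getD j 0)).set j (arr.getD i 0)) := by
      intro t ht
      have := List.find?_eq_none.1 hfind t (List.mem_range.2 (by omega))
      simp only [decide_eq_true_eq] at this
      omega
    rw [if_pos ((sortedA_iff _).2 hsL)]
  | some p =>
    have hpmem : p < arr.length - 1 := List.mem_range.1 (List.mem_of_find?_eq_some hfind)
    have hpv : ((arr.set i (arr.getD j 0)).set j (arr.getD i 0)).getD (p + 1) 0
        < ((arr.set i (arr.getD j 0)).set j (arr.getD i 0)).getD p 0 := by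
      simpa using List.find?_some hfind
    have hnot : ¬(pvIsSortedA ((arr.set i (arr.getD j 0)).set j (arr.getD i 0)) = true) := by
      rw [sortedA_iff]
      intro h
      exact absurd (h p (by omega)) (not_le.2 hpv)
    rw [if_neg hnot]
    cases bsa with
    | false => simp
    | true =>
      rw [if_pos rfl]
      dsimp only
      rw [Bool.true_and]
      exact shift_phase_eq _ p (by omega) hpv

-- ===== VERDICT (by name: the statement is the Claim_ definition above) =====
theorem rearrange_two_operations_spec : Claim_equal_rearrange_two_operations := by
  intro arr bsa _
  unfold Spec_rearrange_two_operations
  unfold rearrange_two_operations rearrange_two_operations_alt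
  dsimp only
  have hfirst : PySem.List.pyGetD arr 0 0 = arr.getD 0 0 := by
    rw [show (0 : Int) = ((0 : Nat) : Int) from rfl, PySem.List.pyGetD_natCast]
  by_cases hc : arr.length = 0 ∨ SortedP arr
  · have hA : (decide (arr.length = 0) || pvIsSortedA arr) = true := by
      rw [Bool.or_eq_true]
      rcases hc with h | h
      · exact Or.inl (by simpa using h)
      · exact Or.inr ((sortedA_iff arr).2 h)
    have hB : (decide (arr.length = 0) || pvSortedEqB arr) = true := by
      rw [Bool.or_eq_true]
      rcases hc with h | h
      · exact Or.inl (by simpa using h)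
      · exact Or.inr ((sortedEqB_iff arr).2 h)
    rw [if_pos hA, if_pos hB]
  · push Not at hc
    have hA : ¬((decide (arr.length = 0) || pvIsSortedA arr) = true) := by
      rw [Bool.or_eq_true]
      rintro (h | h)
      · exact hc.1 (by simpa using h)
      · exact hc.2 ((sortedA_iff arr).1 h)
    have hB : ¬((decide (arr.length = 0) || pvSortedEqB arr) = true) := by
      rw [Bool.or_eq_true]
      rintro (h | h)
      · exact hc.1 (by simpa using h)
      · exact hc.2 ((sortedEqB_iff arr).1 h)
    rw [if_neg hA, if_neg hB]
    -- parity branch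
    have hcount : (arr.foldl (fun acc x => if x < PySem.List.pyGetD arr 0 0 then acc + 1
        else acc) 0 : Int)
        = ((arr.filter fun x => decide (x < arr.getD 0 0)).length : Int) := by
      rw [show (fun (acc : Int) (x : Int) => if x < PySem.List.pyGetD arr 0 0 then acc + 1
          else acc)
        = (fun (acc : Int) (x : Int) =>
            if (fun y => decide (y < arr.getD 0 0)) x = true then acc + 1 else acc) by
          funext a x; rw [hfirst]; by_cases h : x < arr.getD 0 0
          · rw [if_pos h, if_pos (by simpa using h)]
          · rw [if_neg h, if_neg (by simpa using h)]]
      rw [PySem.List.foldl_count_if, List.countP_eq_length_filter]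
      simp
    have hpar : (PySem.Int.mod (arr.foldl (fun acc x =>
          if x < PySem.List.pyGetD arr 0 0 then acc + 1 else acc) 0) 2 ≠ 0)
        ↔ ((arr.filter fun x => decide (x < arr.getD 0 0)).length % 2 ≠ 0) := by
      rw [hcount, show ((2:Int) = ((2:Nat):Int)) by norm_num, PySem.Int.mod_natCast]
      exact_mod_cast Iff.rfl
    by_cases hp : ((arr.filter fun x => decide (x < arr.getD 0 0)).length % 2 ≠ 0)
    · rw [if_pos (hpar.2 hp), if_pos hp]
    · rw [if_neg (fun h => hp (hpar.1 h)), if_neg hp]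
      by_cases hV : 6 < ((List.range (arr.length - 1)).filter
          (fun t => decide (arr.getD (t + 1) 0 < arr.getD t 0))).length
      swap
      · rw [if_neg hV]
        -- main search
        rw [Bool.eq_iff_iff]
        simp only [List.any_eq_true, PySem.List.mem_pyRange_one, List.mem_range,
          List.mem_range'_1]
        constructor
        · rintro ⟨i, ⟨hi0, hin⟩, j, ⟨hj1, hjn⟩, hbody⟩
          obtain ⟨i', rfl⟩ := Int.eq_ofNat_of_zero_le hi0
          obtain ⟨j', rfl⟩ := Int.eq_ofNat_of_zero_le (by omega : (0:Int) ≤ j)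
          refine ⟨i', by omega, j', ⟨by omega, by omega⟩, ?_⟩
          rw [← body_eq arr bsa i' j' (by omega) (by omega)]
          exact hbody
        · rintro ⟨i, hi, j, ⟨hj1, hj2⟩, hbody⟩
          refine ⟨(i : Int), ⟨by positivity, by omega⟩, (j : Int), ⟨by omega, by omega⟩, ?_⟩
          rw [body_eq arr bsa i j (by omega) (by omega)]
          exact hbody
      · rw [if_pos hV]
        rw [List.any_eq_false]
        intro ii hii
        simp only [Bool.not_eq_true]
        rw [List.any_eq_false]
        intro jj hjj
        simp only [Bool.not_eq_true]
        rw [PySem.List.mem_pyRange_one] at hii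
        obtain ⟨i', rfl⟩ := Int.eq_ofNat_of_zero_le hii.1
        rw [PySem.List.mem_pyRange_one] at hjj
        obtain ⟨j', rfl⟩ := Int.eq_ofNat_of_zero_le (by omega : (0:Int) ≤ jj)
        exact bodyA_false_of_many_viols arr bsa i' j' (by omega) (by omega) hV
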